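-- pv_equiv track=rewrite | github.com/ayazkhan27/cyclic | asymmetricdemo.py | minimal_movement
-- ===== SOURCE A (Python) =====
-- def minimal_movement(start_sequence, target_sequence, digit_positions, sequence_length):
--     start_positions = digit_positions[start_sequence]
--     target_positions = digit_positions[target_sequence]
--     min_movements = []
--     min_movement_value = sequence_length
--
--     for start_pos in start_positions:
--         for target_pos in target_positions:
--             clockwise_movement = (target_pos - start_pos) % sequence_length
--             anticlockwise_movement = (start_pos - target_pos) % sequence_length
--
--             if clockwise_movement < min_movement_value:
--                 min_movements = [clockwise_movement]
--                 min_movement_value = clockwise_movement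
--             elif clockwise_movement == min_movement_value:
--                 min_movements.append(clockwise_movement)
--
--             if anticlockwise_movement < min_movement_value:
--                 min_movements = [-anticlockwise_movement]
--                 min_movement_value = anticlockwise_movement
--             elif anticlockwise_movement == min_movement_value:
--                 min_movements.append(-anticlockwise_movement)
--
--     return min_movements
-- ===== SOURCE B (Python) =====
-- def minimal_movement(start_sequence, target_sequence, digit_positions, sequence_length):
--     start_positions = digit_positions[start_sequence]
--     target_positions = digit_positions[target_sequence]
--     entries = []
--     for s in start_positions:
--         for t in target_positions:
--             cw = (t - s) % sequence_length
--             acw = (s - t) % sequence_length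
--             entries.append((cw, cw))
--             entries.append((acw, -acw))
--     if not entries:
--         return []
--     m = min(v for v, _ in entries)
--     return [x for v, x in entries if v == m]
-- ===== Notes on version B (the rewrite author's own statement) =====
-- stated objective: simpler
-- what changed: Replaced the running-minimum-with-reset state machine by a plain two-pass: flatten all signed candidate movements once, take the minimum of their values, then filter the candidates equal to that minimum.
-- outside the precondition, e.g. on minimal_movement('a', 'b', {'a': [0], 'b': [1]}, -2): A returns [], B returns [-1, 1]; on minimal_movement('a', 'b', {'a': [0], 'b': [1]}, 0): A raises ZeroDivisionError, B raises ZeroDivisionError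
import Mathlib
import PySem

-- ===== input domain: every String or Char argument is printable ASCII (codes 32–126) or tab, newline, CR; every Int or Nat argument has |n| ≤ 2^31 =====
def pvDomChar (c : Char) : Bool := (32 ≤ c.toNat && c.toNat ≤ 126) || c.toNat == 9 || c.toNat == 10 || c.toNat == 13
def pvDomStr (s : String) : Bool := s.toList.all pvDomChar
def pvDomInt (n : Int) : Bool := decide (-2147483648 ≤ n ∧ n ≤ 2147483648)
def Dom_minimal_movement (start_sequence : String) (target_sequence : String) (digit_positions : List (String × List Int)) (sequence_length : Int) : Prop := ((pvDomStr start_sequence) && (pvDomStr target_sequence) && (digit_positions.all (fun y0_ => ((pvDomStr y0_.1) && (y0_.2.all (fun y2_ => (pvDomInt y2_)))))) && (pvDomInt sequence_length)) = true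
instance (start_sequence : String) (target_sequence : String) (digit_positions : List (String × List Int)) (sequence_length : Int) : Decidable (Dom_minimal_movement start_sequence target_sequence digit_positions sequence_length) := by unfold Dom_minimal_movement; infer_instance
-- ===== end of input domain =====

-- B replaces A's running-minimum-with-reset state machine by a two-pass min-then-filter
-- over the flattened candidate list; objective: simpler. Equality of return values is
-- proved on Pre_ (keys present, sequence_length ≥ 1, the function's natural domain).

-- ===== PORT A =====
-- dict[key] lookup on the association list (first match)
def pvLookup (d : List (String × List Int)) (k : String) : Option (List Int) :=
  (d.find? (fun p => p.1 == k)).map Prod.snd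

def mmStepA (L : Int) (st : List Int × Int) (s t : Int) : List Int × Int :=
  let cw := PySem.Int.mod (t - s) L
  let acw := PySem.Int.mod (s - t) L
  let st1 := if cw < st.2 then ([cw], cw)
             else if cw = st.2 then (st.1 ++ [cw], st.2) else st
  if acw < st1.2 then ([-acw], acw)
  else if acw = st1.2 then (st1.1 ++ [-acw], st1.2) else st1

def minimal_movement (start_sequence : String) (target_sequence : String) (digit_positions : List (String × List Int)) (sequence_length : Int) : List Int :=
  let start_positions := (pvLookup digit_positions start_sequence).getD []
  let target_positions := (pvLookup digit_positions target_sequence).getD []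
  (start_positions.foldl
    (fun st s => target_positions.foldl (fun st t => mmStepA sequence_length st s t) st)
    (([] : List Int), sequence_length)).1

-- ===== PORT B =====
-- the two signed candidate entries one (s, t) pair contributes: (value, signed output)
def entPair (L : Int) (s t : Int) : List (Int × Int) :=
  let cw := PySem.Int.mod (t - s) L
  let acw := PySem.Int.mod (s - t) L
  [(cw, cw), (acw, -acw)]

def mmEntries (L : Int) (sp tp : List Int) : List (Int × Int) :=
  sp.flatMap (fun s => tp.flatMap (fun t => entPair L s t))

def minimal_movement_alt (start_sequence : String) (target_sequence : String) (digit_positions : List (String × List Int)) (sequence_length : Int) : List Int :=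
  let sp := (pvLookup digit_positions start_sequence).getD []
  let tp := (pvLookup digit_positions target_sequence).getD []
  match mmEntries sequence_length sp tp with
  | [] => []
  | e :: es =>
    let m := (es.map Prod.fst).foldl min e.1
    ((e :: es).filter (fun p => p.1 == m)).map Prod.snd

-- ===== PRECONDITION & SPEC =====
-- Pre_ restricts to the function's natural domain: both keys present (else A raises
-- KeyError) and a positive cycle length (sequence_length = 0 makes A raise
-- ZeroDivisionError; for sequence_length < 0 A returns [] — an artefact of its
-- sentinel initialisation min_movement_value = sequence_length, which no movement
-- value can beat when the 'length' is negative — so negative lengths are excluded).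
def Pre_minimal_movement (start_sequence : String) (target_sequence : String) (digit_positions : List (String × List Int)) (sequence_length : Int) : Prop :=
  (pvLookup digit_positions start_sequence).isSome = true ∧
  (pvLookup digit_positions target_sequence).isSome = true ∧
  1 ≤ sequence_length
instance (start_sequence : String) (target_sequence : String) (digit_positions : List (String × List Int)) (sequence_length : Int) : Decidable (Pre_minimal_movement start_sequence target_sequence digit_positions sequence_length) := by unfold Pre_minimal_movement; infer_instance

def pvWitness_minimal_movement : String × String × (List (String × List Int)) × Int :=
  ("a", "b", [("a", [0, 3]), ("b", [1, 2])], 5)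

def Spec_minimal_movement (start_sequence : String) (target_sequence : String) (digit_positions : List (String × List Int)) (sequence_length : Int) (out : List Int) : Prop := out = minimal_movement_alt start_sequence target_sequence digit_positions sequence_length
instance (start_sequence : String) (target_sequence : String) (digit_positions : List (String × List Int)) (sequence_length : Int) (out : List Int) : Decidable (Spec_minimal_movement start_sequence target_sequence digit_positions sequence_length out) := by unfold Spec_minimal_movement; infer_instance

-- ===== CLAIM (what is proved, stated in full; the proofs are below) =====
def Claim_equal_minimal_movement : Prop := ∀ (start_sequence : String) (target_sequence : String) (digit_positions : List (String × List Int)) (sequence_length : Int), Dom_minimal_movement start_sequence target_sequence digit_positions sequence_length → Pre_minimal_movement start_sequence target_sequence digit_positions sequence_length → Spec_minimal_movement start_sequence target_sequence digit_positions sequence_length (minimal_movement start_sequence target_sequence digit_positions sequence_length)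

-- ===== LEMMAS AND PROOFS =====

-- one A-loop body step, on a single flattened entry
def gstep (st : List Int × Int) (e : Int × Int) : List Int × Int :=
  if e.1 < st.2 then ([e.2], e.1)
  else if e.1 = st.2 then (st.1 ++ [e.2], st.2) else st

theorem inner_fold (L s : Int) (tp : List Int) (st : List Int × Int) :
    tp.foldl (fun st t => mmStepA L st s t) st
      = (tp.flatMap (fun t => entPair L s t)).foldl gstep st := by
  induction tp generalizing st with
  | nil => rfl
  | cons t ts ih =>
      simp only [List.foldl_cons, List.flatMap_cons, List.foldl_append, ih]
      rfl

theorem outer_fold (L : Int) (sp tp : List Int) (st : List Int × Int) :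
    sp.foldl (fun st s => tp.foldl (fun st t => mmStepA L st s t) st) st
      = (mmEntries L sp tp).foldl gstep st := by
  induction sp generalizing st with
  | nil => rfl
  | cons s ss ih =>
      simp only [List.foldl_cons, mmEntries, List.flatMap_cons, List.foldl_append]
      rw [inner_fold, ih]
      rfl

def gmin (m0 : Int) (E : List (Int × Int)) : Int := E.foldl (fun a e => min a e.1) m0
def gsel (m : Int) (E : List (Int × Int)) : List Int :=
  (E.filter (fun p => p.1 == m)).map Prod.snd

theorem gmin_le (m0 : Int) (E : List (Int × Int)) : gmin m0 E ≤ m0 := by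
  induction E generalizing m0 with
  | nil => simp [gmin]
  | cons e es ih =>
      calc gmin m0 (e :: es) = gmin (min m0 e.1) es := rfl
        _ ≤ min m0 e.1 := ih _
        _ ≤ m0 := min_le_left _ _

theorem fold_char (E : List (Int × Int)) (acc : List Int) (m0 : Int) :
    E.foldl gstep (acc, m0)
      = (if gmin m0 E < m0 then gsel (gmin m0 E) E else acc ++ gsel m0 E, gmin m0 E) := by
  induction E generalizing acc m0 with
  | nil => simp [gmin, gsel]
  | cons e es ih =>
      have hcons : gmin m0 (e :: es) = gmin (min m0 e.1) es := rfl
      rcases lt_trichotomy e.1 m0 with h | h | h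
      · -- reset
        have hmin : min m0 e.1 = e.1 := min_eq_right h.le
        have hM : gmin m0 (e :: es) = gmin e.1 es := by rw [hcons, hmin]
        have hle : gmin e.1 es ≤ e.1 := gmin_le _ _
        have hstep : gstep (acc, m0) e = ([e.2], e.1) := by simp [gstep, h]
        rw [List.foldl_cons, hstep, ih, hM]
        have hlt : gmin e.1 es < m0 := lt_of_le_of_lt hle h
        rcases lt_or_eq_of_le hle with h2 | h2
        · have hne : (e.1 == gmin e.1 es) = false := by
            simp [ne_of_gt h2]
          simp [gsel, hne, h2, hlt]
        · rw [h2] at hlt ⊢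
          simp [gsel, hlt]
      · -- equal: append
        have hmin : min m0 e.1 = m0 := min_eq_left (le_of_eq h.symm)
        have hM : gmin m0 (e :: es) = gmin m0 es := by rw [hcons, hmin]
        have hstep : gstep (acc, m0) e = (acc ++ [e.2], m0) := by
          simp [gstep, h]
        rw [List.foldl_cons, hstep, ih, hM]
        by_cases hlt : gmin m0 es < m0
        · have hne : (e.1 == gmin m0 es) = false := by
            simp [h]; exact ne_of_gt hlt
          simp [gsel, hne, hlt]
        · simp [gsel, hlt, h]
      · -- larger: unchanged
        have hmin : min m0 e.1 = m0 := min_eq_left h.le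
        have hM : gmin m0 (e :: es) = gmin m0 es := by rw [hcons, hmin]
        have hstep : gstep (acc, m0) e = (acc, m0) := by
          simp [gstep, not_lt.mpr h.le, (ne_of_gt h)]
        rw [List.foldl_cons, hstep, ih, hM]
        have hle : gmin m0 es ≤ m0 := gmin_le _ _
        by_cases hlt : gmin m0 es < m0
        · have hne : (e.1 == gmin m0 es) = false := by
            simp; exact ne_of_gt (lt_trans hlt h)
          simp [gsel, hne, hlt]
        · have hne : (e.1 == m0) = false := by simp [ne_of_gt h]
          simp [gsel, hne, hlt]

theorem entries_fst_lt (L : Int) (hL : 0 < L) (sp tp : List Int) :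
    ∀ p ∈ mmEntries L sp tp, p.1 < L := by
  intro p hp
  simp only [mmEntries, List.mem_flatMap, entPair, List.mem_cons] at hp
  obtain ⟨s, _, t, _, hp⟩ := hp
  rcases hp with h | h | h
  · rw [h]; exact PySem.Int.mod_lt _ hL
  · rw [h]; exact PySem.Int.mod_lt _ hL
  · simp at h

-- ===== VERDICT (by name: the statement is the Claim_ definition above) =====
theorem minimal_movement_spec : Claim_equal_minimal_movement := by
  intro ss ts dp L _ hpre
  obtain ⟨_, _, hL⟩ := hpre
  have hL0 : (0 : Int) < L := hL
  unfold Spec_minimal_movement minimal_movement minimal_movement_alt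
  simp only []
  rw [outer_fold]
  cases hE : mmEntries L ((pvLookup dp ss).getD []) ((pvLookup dp ts).getD []) with
  | nil => simp
  | cons e es =>
      have he1 : e.1 < L := entries_fst_lt L hL0 _ _ e (by rw [hE]; exact List.mem_cons_self)
      rw [fold_char]
      have hgm : gmin L (e :: es) = (es.map Prod.fst).foldl min e.1 := by
        show gmin (min L e.1) es = _
        rw [min_eq_right he1.le]
        simp [gmin, List.foldl_map]
      have hlt : gmin L (e :: es) < L := by
        have hle := gmin_le (min L e.1) es
        exact lt_of_le_of_lt (le_trans hle (min_le_right _ _)) he1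
      · simp only [hgm] at hlt ⊢
        simp [hlt, gsel]
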